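-- pv_equiv track=rewrite | github.com/Shino-16/Python-chess-engine- | pygameChess-main/pygameChess-main/ai.py | pawn_structure_eval
-- ===== SOURCE A (Python) =====
-- def pawn_structure_eval(white_pieces, white_locations, black_pieces, black_locations):
--     score = 0
--     # Doubled pawns penalty
--     for color, pieces, locs, sign in [
--         ('white', white_pieces, white_locations, 1),
--         ('black', black_pieces, black_locations, -1)
--     ]:
--         pawns = [x for i,x in enumerate(locs) if pieces[i] == 'pawn']
--         files = [x[0] for x in pawns]
--         for f in set(files):
--             count = files.count(f)
--             if count > 1:
--                 score -= sign * 15 * (count - 1)  # penalty per extra pawn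
--
--         # Passed pawns bonus (very basic)
--         for px, py in pawns:
--             if color == 'white':
--                 is_passed = not any(bx == px and by < py for bx, by in [black_locations[i] for i, p in enumerate(black_pieces) if p == 'pawn'])
--                 if is_passed:
--                     score += 20
--             else:
--                 is_passed = not any(wx == px and wy > py for wx, wy in [white_locations[i] for i, p in enumerate(white_pieces) if p == 'pawn'])
--                 if is_passed:
--                     score -= 20
--     return score
-- ===== SOURCE B (Python) =====
-- def pawn_structure_eval(white_pieces, white_locations, black_pieces, black_locations):
--     wpawns = [loc for p, loc in zip(white_pieces, white_locations) if p == 'pawn']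
--     bpawns = [loc for p, loc in zip(black_pieces, black_locations) if p == 'pawn']
--     # doubled-pawn penalty in closed form: extra pawns = pawns minus occupied files
--     score = -15 * (len(wpawns) - len({x for x, _ in wpawns}))
--     score += 15 * (len(bpawns) - len({x for x, _ in bpawns}))
--     # min black rank / max white rank per file; the passed-pawn test becomes a lookup
--     bmin = {}
--     for x, y in bpawns:
--         if x not in bmin or y < bmin[x]:
--             bmin[x] = y
--     wmax = {}
--     for x, y in wpawns:
--         if x not in wmax or y > wmax[x]:
--             wmax[x] = y
--     score += 20 * sum(1 for x, y in wpawns if x not in bmin or bmin[x] >= y)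
--     score -= 20 * sum(1 for x, y in bpawns if x not in wmax or wmax[x] <= y)
--     return score
-- ===== Notes on version B (the rewrite author's own statement) =====
-- stated objective: alternative
-- what changed: One zip pass collects each side's pawns, the doubled-pawn penalty becomes the closed form (pawns minus occupied files), and the per-pawn rebuild-and-rescan of the opponent pawn list is replaced by a min/max-rank-per-file dictionary built once, so the passed-pawn test is a single lookup.
import Mathlib
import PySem

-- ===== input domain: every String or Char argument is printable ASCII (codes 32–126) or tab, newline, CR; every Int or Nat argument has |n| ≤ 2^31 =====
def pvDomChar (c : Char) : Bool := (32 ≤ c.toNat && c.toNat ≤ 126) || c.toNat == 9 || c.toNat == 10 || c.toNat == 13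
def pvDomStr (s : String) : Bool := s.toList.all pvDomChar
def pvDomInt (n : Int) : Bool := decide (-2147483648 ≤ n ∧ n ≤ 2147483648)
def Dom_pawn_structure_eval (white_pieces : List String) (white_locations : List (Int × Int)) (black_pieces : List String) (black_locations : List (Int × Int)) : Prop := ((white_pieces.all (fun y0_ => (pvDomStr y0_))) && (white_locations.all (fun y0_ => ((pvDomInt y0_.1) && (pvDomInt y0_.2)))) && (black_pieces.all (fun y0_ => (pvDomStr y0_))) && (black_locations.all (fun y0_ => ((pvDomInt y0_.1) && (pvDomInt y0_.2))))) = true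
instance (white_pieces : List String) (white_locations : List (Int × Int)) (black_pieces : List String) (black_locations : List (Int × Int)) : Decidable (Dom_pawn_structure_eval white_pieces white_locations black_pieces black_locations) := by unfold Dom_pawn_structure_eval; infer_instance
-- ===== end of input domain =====

-- B replaces A's per-pawn rebuild-and-rescan of the opponent pawn list by one zip pass,
-- a closed-form doubled-pawn count (pawns minus occupied files) and precomputed
-- min/max-rank-per-file dictionaries (objective: alternative algorithm, same measured cost).


-- ===== PORT A =====
-- literal transliteration of A; the two iterations of the color loop are unrolled
def pawn_structure_eval (white_pieces : List String) (white_locations : List (Int × Int)) (black_pieces : List String) (black_locations : List (Int × Int)) : Int :=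
  let score : Int := 0
  -- color = 'white', sign = 1
  let pawnsW := ((PySem.List.enumerate white_locations 0).filter
      (fun ix => PySem.List.pyGetD white_pieces ix.1 "" == "pawn")).map (·.2)
  let filesW := pawnsW.map (·.1)
  let score := (PySem.Set.ofList filesW).foldl
      (fun s f => if 1 < PySem.List.count filesW f then
          s - 1 * 15 * ((PySem.List.count filesW f : Int) - 1) else s) score
  let score := pawnsW.foldl (fun s pxy =>
      let opp := ((PySem.List.enumerate black_pieces 0).filter (fun ip => ip.2 == "pawn")).map
          (fun ip => PySem.List.pyGetD black_locations ip.1 (0, 0))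
      if !(opp.any (fun b => b.1 == pxy.1 && b.2 < pxy.2)) then s + 20 else s) score
  -- color = 'black', sign = -1
  let pawnsB := ((PySem.List.enumerate black_locations 0).filter
      (fun ix => PySem.List.pyGetD black_pieces ix.1 "" == "pawn")).map (·.2)
  let filesB := pawnsB.map (·.1)
  let score := (PySem.Set.ofList filesB).foldl
      (fun s f => if 1 < PySem.List.count filesB f then
          s - (-1) * 15 * ((PySem.List.count filesB f : Int) - 1) else s) score
  let score := pawnsB.foldl (fun s pxy =>
      let opp := ((PySem.List.enumerate white_pieces 0).filter (fun ip => ip.2 == "pawn")).map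
          (fun ip => PySem.List.pyGetD white_locations ip.1 (0, 0))
      if !(opp.any (fun w => w.1 == pxy.1 && pxy.2 < w.2)) then s - 20 else s) score
  score

-- ===== PORT B =====
def pawn_structure_eval_alt (white_pieces : List String) (white_locations : List (Int × Int)) (black_pieces : List String) (black_locations : List (Int × Int)) : Int :=
  let wpawns := ((white_pieces.zip white_locations).filter (fun p => p.1 == "pawn")).map (·.2)
  let bpawns := ((black_pieces.zip black_locations).filter (fun p => p.1 == "pawn")).map (·.2)
  let score : Int := -15 * ((wpawns.length : Int) - ((PySem.Set.ofList (wpawns.map (·.1))).length : Int))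
  let score := score + 15 * ((bpawns.length : Int) - ((PySem.Set.ofList (bpawns.map (·.1))).length : Int))
  let bmin := bpawns.foldl (fun d xy =>
      match PySem.Dict.get? d xy.1 with
      | none => d.insert xy.1 xy.2
      | some m => if xy.2 < m then d.insert xy.1 xy.2 else d) PySem.Dict.empty
  let wmax := wpawns.foldl (fun d xy =>
      match PySem.Dict.get? d xy.1 with
      | none => d.insert xy.1 xy.2
      | some m => if m < xy.2 then d.insert xy.1 xy.2 else d) PySem.Dict.empty
  let score := score + 20 * ((wpawns.countP (fun xy =>
      match PySem.Dict.get? bmin xy.1 with | none => true | some m => decide (xy.2 ≤ m))) : Int)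
  let score := score - 20 * ((bpawns.countP (fun xy =>
      match PySem.Dict.get? wmax xy.1 with | none => true | some m => decide (m ≤ xy.2))) : Int)
  score

-- ===== PRECONDITION & SPEC =====
-- Pre_ is exactly the set of inputs on which A returns: A raises IndexError when a locations
-- list is longer than its pieces list, or when the side to be scanned for opposing pawns has a
-- 'pawn' entry beyond the end of its locations list while the scanning side has a pawn.
def Pre_pawn_structure_eval (white_pieces : List String) (white_locations : List (Int × Int)) (black_pieces : List String) (black_locations : List (Int × Int)) : Prop :=
  white_locations.length ≤ white_pieces.length ∧
  black_locations.length ≤ black_pieces.length ∧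
  ("pawn" ∈ white_pieces.take white_locations.length → "pawn" ∉ black_pieces.drop black_locations.length) ∧
  ("pawn" ∈ black_pieces.take black_locations.length → "pawn" ∉ white_pieces.drop white_locations.length)
instance (white_pieces : List String) (white_locations : List (Int × Int)) (black_pieces : List String) (black_locations : List (Int × Int)) : Decidable (Pre_pawn_structure_eval white_pieces white_locations black_pieces black_locations) := by unfold Pre_pawn_structure_eval; infer_instance
def pvWitness_pawn_structure_eval : List String × (List (Int × Int)) × List String × (List (Int × Int)) :=
  (["pawn", "rook"], [(0, 1), (0, 2)], ["pawn"], [(3, 6)])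

def Spec_pawn_structure_eval (white_pieces : List String) (white_locations : List (Int × Int)) (black_pieces : List String) (black_locations : List (Int × Int)) (out : Int) : Prop := out = pawn_structure_eval_alt white_pieces white_locations black_pieces black_locations
instance (white_pieces : List String) (white_locations : List (Int × Int)) (black_pieces : List String) (black_locations : List (Int × Int)) (out : Int) : Decidable (Spec_pawn_structure_eval white_pieces white_locations black_pieces black_locations out) := by unfold Spec_pawn_structure_eval; infer_instance

-- ===== CLAIM (what is proved, stated in full; the proofs are below) =====
def Claim_equal_pawn_structure_eval : Prop := ∀ (white_pieces : List String) (white_locations : List (Int × Int)) (black_pieces : List String) (black_locations : List (Int × Int)), Dom_pawn_structure_eval white_pieces white_locations black_pieces black_locations → Pre_pawn_structure_eval white_pieces white_locations black_pieces black_locations → Spec_pawn_structure_eval white_pieces white_locations black_pieces black_locations (pawn_structure_eval white_pieces white_locations black_pieces black_locations)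

-- ===== LEMMAS AND PROOFS =====
theorem pv_own_aux (locs : List (Int × Int)) : ∀ (pieces : List String) (k : Nat),
    locs.length + k ≤ pieces.length →
    ((locs.zipIdx k).filter (fun p => pieces.getD p.2 "" == "pawn")).map (·.1)
      = (((pieces.drop k).zip locs).filter (fun p => p.1 == "pawn")).map (·.2) := by
  induction locs with
  | nil => simp
  | cons z ls ih =>
    intro pieces k h
    have hk : k < pieces.length := by simp at h; omega
    rw [List.zipIdx_cons, List.drop_eq_getElem_cons hk]
    simp only [List.zip_cons_cons, List.filter_cons, List.getD_eq_getElem pieces "" hk]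
    have := ih pieces (k + 1) (by simp at h ⊢; omega)
    by_cases hp : pieces[k] == "pawn" <;> simp [hp] <;> simpa [List.getD] using this

theorem pv_own_eq (pieces : List String) (locs : List (Int × Int))
    (h : locs.length ≤ pieces.length) :
    ((PySem.List.enumerate locs 0).filter
        (fun ix => PySem.List.pyGetD pieces ix.1 "" == "pawn")).map (·.2)
      = ((pieces.zip locs).filter (fun p => p.1 == "pawn")).map (·.2) := by
  rw [PySem.List.enumerate_eq_zipIdx_map]
  simp only [List.filter_map, List.map_map, Function.comp_def, zero_add,
    PySem.List.pyGetD_natCast]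
  have := pv_own_aux locs pieces 0 (by omega)
  simpa using this

theorem pv_opp_aux (pieces : List String) : ∀ (locs : List (Int × Int)) (k : Nat) (d : Int × Int),
    k ≤ locs.length → "pawn" ∉ pieces.drop (locs.length - k) →
    ((pieces.zipIdx k).filter (fun p => p.1 == "pawn")).map (fun p => locs.getD p.2 d)
      = ((pieces.zip (locs.drop k)).filter (fun p => p.1 == "pawn")).map (·.2) := by
  induction pieces with
  | nil => simp
  | cons q ps ih =>
    intro locs k d hk hnp
    by_cases hlt : k < locs.length
    · rw [List.zipIdx_cons, List.drop_eq_getElem_cons hlt]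
      simp only [List.zip_cons_cons, List.filter_cons]
      have htail : "pawn" ∉ ps.drop (locs.length - (k + 1)) := by
        intro hmem
        apply hnp
        have h1 : locs.length - k = (locs.length - (k + 1)) + 1 := by omega
        rw [h1, List.drop_succ_cons] at *
        · exact hmem
      have := ih locs (k + 1) d (by omega) htail
      have hthis := by simpa [List.getD] using this
      by_cases hp : q == "pawn" <;>
        simp [hp, hthis, List.getElem?_eq_getElem hlt]
    · have hke : k = locs.length := by omega
      subst hke
      have hall : "pawn" ∉ q :: ps := by simpa using hnp
      rw [List.drop_length]
      simp only [List.zip_nil_right, List.filter_nil, List.map_nil]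
      rw [List.filter_eq_nil_iff.mpr, List.map_nil]
      intro p hp
      have := List.fst_mem_of_mem_zipIdx hp
      simp only [beq_iff_eq]
      intro hpe
      exact hall (hpe ▸ this)

theorem pv_opp_eq (pieces : List String) (locs : List (Int × Int)) (d : Int × Int)
    (h : "pawn" ∉ pieces.drop locs.length) :
    ((PySem.List.enumerate pieces 0).filter (fun ip => ip.2 == "pawn")).map
        (fun ip => PySem.List.pyGetD locs ip.1 d)
      = ((pieces.zip locs).filter (fun p => p.1 == "pawn")).map (·.2) := by
  rw [PySem.List.enumerate_eq_zipIdx_map]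
  simp only [List.filter_map, List.map_map, Function.comp_def, zero_add,
    PySem.List.pyGetD_natCast]
  have := pv_opp_aux pieces locs 0 d (by omega) (by simpa using h)
  simpa using this

theorem pv_mem_zip_take {α β : Type} (l1 : List α) : ∀ (l2 : List β) (p : α × β),
    p ∈ l1.zip l2 → p.1 ∈ l1.take l2.length := by
  induction l1 with
  | nil => simp
  | cons a l1 ih =>
    intro l2 p hp
    cases l2 with
    | nil => simp at hp
    | cons b l2 =>
      rw [List.zip_cons_cons] at hp
      rcases List.mem_cons.mp hp with h | h
      · simp [h]
      · simpa using Or.inr (ih l2 p h)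

theorem pv_foldl_sub {α : Type} (g : α → Int) (l : List α) : ∀ (s : Int),
    l.foldl (fun s f => s - g f) s = s - (l.map g).sum := by
  induction l with
  | nil => simp
  | cons a l ih => intro s; simp [ih]; ring

theorem pv_sum_counts (files : List Int) :
    ((PySem.Set.ofList files).map (fun f => (List.count f files : Int))).sum
      = (files.length : Int) := by
  have hperm : (PySem.Set.ofList files).Perm files.dedup :=
    (List.perm_ext_iff_of_nodup (PySem.Set.nodup_ofList files) files.nodup_dedup).mpr
      (fun a => by rw [PySem.Set.mem_ofList, List.mem_dedup])
  rw [(hperm.map _).sum_eq]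
  have : (files.dedup.map (fun f => (List.count f files : Int))).sum
      = ((files.dedup.map (fun f => List.count f files)).sum : Int) := by
    rw [Nat.cast_list_sum, List.map_map]; rfl
  rw [this, List.sum_map_count_dedup_eq_length]

theorem pv_doubled (files : List Int) (c s : Int) :
    (PySem.Set.ofList files).foldl
        (fun s f => if 1 < PySem.List.count files f then
            s - c * ((PySem.List.count files f : Int) - 1) else s) s
      = s - c * ((files.length : Int) - ((PySem.Set.ofList files).length : Int)) := by
  rw [PySem.List.foldl_congr_mem _ _ (fun s f => s - c * ((List.count f files : Int) - 1)) s ?_]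
  · rw [pv_foldl_sub]
    rw [show (fun f => c * ((List.count f files : Int) - 1))
        = fun f => c * ((List.count f files : Int) + (-1)) from funext (fun f => by ring),
      List.sum_map_mul_left, PySem.List.sum_map_add_int, PySem.List.sum_map_const_int,
      pv_sum_counts]
    ring
  · intro acc f hf
    rw [PySem.List.count_eq]
    split
    · rfl
    · have h1 : 0 < List.count f files := List.count_pos_iff.mpr ((PySem.Set.mem_ofList files f).mp hf)
      have h2 : List.count f files = 1 := by omega
      simp [h2]

theorem pv_foldl_if_add {α : Type} (p : α → Bool) (c : Int) (l : List α) : ∀ (s : Int),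
    l.foldl (fun s x => if p x then s + c else s) s = s + c * (l.countP p : Int) := by
  induction l with
  | nil => simp
  | cons a l ih =>
    intro s
    by_cases hp : p a <;> simp [hp, ih] <;> ring

theorem pv_foldl_if_sub {α : Type} (p : α → Bool) (c : Int) (l : List α) : ∀ (s : Int),
    l.foldl (fun s x => if p x then s - c else s) s = s - c * (l.countP p : Int) := by
  induction l with
  | nil => simp
  | cons a l ih =>
    intro s
    by_cases hp : p a <;> simp [hp, ih] <;> ring

theorem pv_min_aux (L : List (Int × Int)) (x y : Int) : ∀ (d : PySem.Dict Int Int),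
    (match PySem.Dict.get? (L.foldl (fun d xy =>
        match PySem.Dict.get? d xy.1 with
        | none => d.insert xy.1 xy.2
        | some m => if xy.2 < m then d.insert xy.1 xy.2 else d) d) x with
      | none => true
      | some m => decide (y ≤ m))
      = ((match PySem.Dict.get? d x with
          | none => true
          | some m => decide (y ≤ m)) && !(L.any (fun b => b.1 == x && b.2 < y))) := by
  induction L with
  | nil => intro d; simp
  | cons xy L ih =>
    intro d
    rw [List.foldl_cons, ih]
    have key : (match PySem.Dict.get? (match PySem.Dict.get? d xy.1 with
          | none => d.insert xy.1 xy.2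
          | some m => if xy.2 < m then d.insert xy.1 xy.2 else d) x with
        | none => true
        | some m => decide (y ≤ m))
        = ((match PySem.Dict.get? d x with
            | none => true
            | some m => decide (y ≤ m)) && !(xy.1 == x && decide (xy.2 < y))) := by
      by_cases hx : xy.1 = x
      · subst hx
        cases hget : PySem.Dict.get? d xy.1 with
        | none =>
          simp [PySem.Dict.get?_insert_self, ← decide_not]
        | some m =>
          dsimp only
          split_ifs with hm <;>
            (rw [Bool.eq_iff_iff]; simp [hget, PySem.Dict.get?_insert_self]; omega)
      · have hbx : (xy.1 == x) = false := by simp [hx]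
        cases hget : PySem.Dict.get? d xy.1 with
        | none => simp [PySem.Dict.get?_insert_of_ne d xy.2 (Ne.symm hx), hbx]
        | some m =>
          dsimp only
          split_ifs with hm <;>
            simp [PySem.Dict.get?_insert_of_ne d xy.2 (Ne.symm hx), hbx]
    rw [key]
    simp [Bool.not_or, Bool.and_assoc]

theorem pv_min_test (L : List (Int × Int)) (x y : Int) :
    (match PySem.Dict.get? (L.foldl (fun d xy =>
        match PySem.Dict.get? d xy.1 with
        | none => d.insert xy.1 xy.2
        | some m => if xy.2 < m then d.insert xy.1 xy.2 else d) PySem.Dict.empty) x with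
      | none => true
      | some m => decide (y ≤ m))
      = !(L.any (fun b => b.1 == x && b.2 < y)) := by
  rw [pv_min_aux]
  simp [PySem.Dict.get?_empty]

theorem pv_max_aux (L : List (Int × Int)) (x y : Int) : ∀ (d : PySem.Dict Int Int),
    (match PySem.Dict.get? (L.foldl (fun d xy =>
        match PySem.Dict.get? d xy.1 with
        | none => d.insert xy.1 xy.2
        | some m => if m < xy.2 then d.insert xy.1 xy.2 else d) d) x with
      | none => true
      | some m => decide (m ≤ y))
      = ((match PySem.Dict.get? d x with
          | none => true
          | some m => decide (m ≤ y)) && !(L.any (fun w => w.1 == x && y < w.2))) := by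
  induction L with
  | nil => intro d; simp
  | cons xy L ih =>
    intro d
    rw [List.foldl_cons, ih]
    have key : (match PySem.Dict.get? (match PySem.Dict.get? d xy.1 with
          | none => d.insert xy.1 xy.2
          | some m => if m < xy.2 then d.insert xy.1 xy.2 else d) x with
        | none => true
        | some m => decide (m ≤ y))
        = ((match PySem.Dict.get? d x with
            | none => true
            | some m => decide (m ≤ y)) && !(xy.1 == x && decide (y < xy.2))) := by
      by_cases hx : xy.1 = x
      · subst hx
        cases hget : PySem.Dict.get? d xy.1 with
        | none =>
          simp [PySem.Dict.get?_insert_self, ← decide_not]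
        | some m =>
          dsimp only
          split_ifs with hm <;>
            (rw [Bool.eq_iff_iff]; simp [hget, PySem.Dict.get?_insert_self]; omega)
      · have hbx : (xy.1 == x) = false := by simp [hx]
        cases hget : PySem.Dict.get? d xy.1 with
        | none => simp [PySem.Dict.get?_insert_of_ne d xy.2 (Ne.symm hx), hbx]
        | some m =>
          dsimp only
          split_ifs with hm <;>
            simp [PySem.Dict.get?_insert_of_ne d xy.2 (Ne.symm hx), hbx]
    rw [key]
    simp [Bool.not_or, Bool.and_assoc]

theorem pv_max_test (L : List (Int × Int)) (x y : Int) :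
    (match PySem.Dict.get? (L.foldl (fun d xy =>
        match PySem.Dict.get? d xy.1 with
        | none => d.insert xy.1 xy.2
        | some m => if m < xy.2 then d.insert xy.1 xy.2 else d) PySem.Dict.empty) x with
      | none => true
      | some m => decide (m ≤ y))
      = !(L.any (fun w => w.1 == x && y < w.2)) := by
  rw [pv_max_aux]
  simp [PySem.Dict.get?_empty]

-- ===== VERDICT (by name: the statement is the Claim_ definition above) =====
theorem pawn_structure_eval_spec : Claim_equal_pawn_structure_eval := by
  intro wp wl bp bl _hdom hpre
  obtain ⟨h1, h2, h3, h4⟩ := hpre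
  show pawn_structure_eval wp wl bp bl = pawn_structure_eval_alt wp wl bp bl
  simp only [pawn_structure_eval, pawn_structure_eval_alt]
  rw [pv_own_eq wp wl h1, pv_own_eq bp bl h2]
  rw [pv_doubled, pv_doubled, pv_foldl_if_add, pv_foldl_if_sub]
  rw [funext (fun xy : Int × Int => pv_min_test
      (((bp.zip bl).filter (fun p => p.1 == "pawn")).map (·.2)) xy.1 xy.2)]
  rw [funext (fun xy : Int × Int => pv_max_test
      (((wp.zip wl).filter (fun p => p.1 == "pawn")).map (·.2)) xy.1 xy.2)]
  have hcW :
      List.countP (fun pxy : Int × Int =>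
          !(((PySem.List.enumerate bp 0).filter (fun ip => ip.2 == "pawn")).map
              (fun ip => PySem.List.pyGetD bl ip.1 (0, 0))).any
            (fun b => b.1 == pxy.1 && decide (b.2 < pxy.2)))
        (((wp.zip wl).filter (fun p => p.1 == "pawn")).map (·.2))
      = List.countP (fun pxy : Int × Int =>
          !((((bp.zip bl).filter (fun p => p.1 == "pawn")).map (·.2)).any
            (fun b => b.1 == pxy.1 && decide (b.2 < pxy.2))))
        (((wp.zip wl).filter (fun p => p.1 == "pawn")).map (·.2)) := by
    by_cases hWn : "pawn" ∈ wp.take wl.length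
    · rw [pv_opp_eq bp bl (0, 0) (h3 hWn)]
    · have hWnil : ((wp.zip wl).filter (fun p => p.1 == "pawn")).map (·.2) = ([] : List (Int × Int)) := by
        rw [List.filter_eq_nil_iff.mpr, List.map_nil]
        intro p hp hb
        exact hWn ((beq_iff_eq.mp hb) ▸ pv_mem_zip_take wp wl p hp)
      rw [hWnil]
      simp
  have hcB :
      List.countP (fun pxy : Int × Int =>
          !(((PySem.List.enumerate wp 0).filter (fun ip => ip.2 == "pawn")).map
              (fun ip => PySem.List.pyGetD wl ip.1 (0, 0))).any
            (fun w => w.1 == pxy.1 && decide (pxy.2 < w.2)))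
        (((bp.zip bl).filter (fun p => p.1 == "pawn")).map (·.2))
      = List.countP (fun pxy : Int × Int =>
          !((((wp.zip wl).filter (fun p => p.1 == "pawn")).map (·.2)).any
            (fun w => w.1 == pxy.1 && decide (pxy.2 < w.2))))
        (((bp.zip bl).filter (fun p => p.1 == "pawn")).map (·.2)) := by
    by_cases hBn : "pawn" ∈ bp.take bl.length
    · rw [pv_opp_eq wp wl (0, 0) (h4 hBn)]
    · have hBnil : ((bp.zip bl).filter (fun p => p.1 == "pawn")).map (·.2) = ([] : List (Int × Int)) := by
        rw [List.filter_eq_nil_iff.mpr, List.map_nil]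
        intro p hp hb
        exact hBn ((beq_iff_eq.mp hb) ▸ pv_mem_zip_take bp bl p hp)
      rw [hBnil]
      simp
  rw [hcW, hcB]
  simp only [List.length_map]
  ring
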